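-- pv_equiv track=rewrite | github.com/zoeysolis/binomio-newton-python | binomio.py | mostrar_como_expresion
-- ===== SOURCE A (Python) =====
-- def mostrar_como_expresion(lista):
--     """Une los términos en una cadena legible con signos + y -"""
--     resultado = ""
--     for i, t in enumerate(lista):
--         if t.startswith("-"):
--             resultado += " - " + t[1:]
--         else:
--             if i == 0:
--                 resultado += t
--             else:
--                 resultado += " + " + t
--     return resultado
-- ===== SOURCE B (Python) =====
-- def mostrar_como_expresion(lista):
--     """Une los términos en una cadena legible con signos + y -"""
--     def signo(t):
--         return " - " + t[1:] if t.startswith("-") else " + " + t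
--     def cola(ts):
--         # divide-and-conquer concatenation of the signed fragments of ts
--         if len(ts) == 0:
--             return ""
--         if len(ts) == 1:
--             return signo(ts[0])
--         m = len(ts) // 2
--         return cola(ts[:m]) + cola(ts[m:])
--     if not lista:
--         return ""
--     t = lista[0]
--     cabeza = " - " + t[1:] if t.startswith("-") else t
--     return cabeza + cola(lista[1:])
-- ===== Notes on version B (the rewrite author's own statement) =====
-- stated objective: alternative
-- what changed: B replaces A's indexed left-to-right accumulation loop with divide and conquer: the first term is handled by its structural position (no enumerate/i==0 branch, no running accumulator), and the tail's signed fragments are concatenated by recursively splitting the list in halves.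
import Mathlib
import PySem

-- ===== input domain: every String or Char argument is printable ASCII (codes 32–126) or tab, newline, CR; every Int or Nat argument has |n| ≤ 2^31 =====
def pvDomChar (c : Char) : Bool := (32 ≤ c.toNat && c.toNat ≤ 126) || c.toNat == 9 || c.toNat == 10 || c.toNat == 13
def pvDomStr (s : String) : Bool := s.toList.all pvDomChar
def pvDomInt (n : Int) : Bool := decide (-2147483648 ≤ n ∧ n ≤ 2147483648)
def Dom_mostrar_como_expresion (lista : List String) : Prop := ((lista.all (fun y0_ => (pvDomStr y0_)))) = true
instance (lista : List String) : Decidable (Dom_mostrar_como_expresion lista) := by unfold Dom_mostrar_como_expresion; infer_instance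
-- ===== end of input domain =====

-- B replaces A's indexed accumulation loop by divide and conquer: the head term is special-cased
-- by position and the tail's signed fragments are concatenated by halving (objective: alternative).

-- ===== PORT A =====
-- loop body of A, kept as a helper (branches in A's order)
def pvStepA (resultado : String) (it : Int × String) : String :=
  if PySem.Str.startswith it.2 "-" then resultado ++ (" - " ++ PySem.Str.slice it.2 (some 1) none)
  else if it.1 == 0 then resultado ++ it.2
  else resultado ++ (" + " ++ it.2)

def mostrar_como_expresion (lista : List String) : String :=
  (PySem.List.enumerate lista 0).foldl pvStepA ""

-- ===== PORT B =====
-- B's helper 'signo': the signed fragment of one term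
def pvSigno (t : String) : String :=
  if PySem.Str.startswith t "-" then " - " ++ PySem.Str.slice t (some 1) none else " + " ++ t

-- B's helper 'cola': divide-and-conquer concatenation of the signed fragments
-- (structural fuel = list length makes the halving recursion total; it is never exhausted;
-- ts[0] on a known one-element list is ported as headD "", exact there)
def pvColaDCGo : Nat → List String → String
  | _, [] => ""
  | 0, _ :: _ => ""
  | fuel + 1, t :: ts =>
    if (t :: ts).length = 1 then pvSigno ((t :: ts).headD "")
    else
      let m := (t :: ts).length / 2
      pvColaDCGo fuel ((t :: ts).take m) ++ pvColaDCGo fuel ((t :: ts).drop m)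

def pvColaDC (ts : List String) : String := pvColaDCGo ts.length ts

def mostrar_como_expresion_alt (lista : List String) : String :=
  match lista with
  | [] => ""
  | t :: rest =>
    (if PySem.Str.startswith t "-" then " - " ++ PySem.Str.slice t (some 1) none else t)
      ++ pvColaDC rest

-- ===== PRECONDITION & SPEC =====
def Spec_mostrar_como_expresion (lista : List String) (out : String) : Prop := out = mostrar_como_expresion_alt lista
instance (lista : List String) (out : String) : Decidable (Spec_mostrar_como_expresion lista out) := by unfold Spec_mostrar_como_expresion; infer_instance

-- ===== CLAIM =====
def Claim_equal_mostrar_como_expresion : Prop := ∀ (lista : List String), Dom_mostrar_como_expresion lista → Spec_mostrar_como_expresion lista (mostrar_como_expresion lista)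

-- ===== LEMMAS AND PROOFS =====

-- proof-side linear concatenation of signed fragments
def pvColaLin : List String → String
  | [] => ""
  | t :: ts => pvSigno t ++ pvColaLin ts

lemma pvColaLin_append (xs ys : List String) :
    pvColaLin (xs ++ ys) = pvColaLin xs ++ pvColaLin ys := by
  induction xs with
  | nil => simp [pvColaLin]
  | cons t xs ih => simp [pvColaLin, ih, String.append_assoc]

-- with enough fuel, the halving assembly computes the linear concatenation
lemma pvColaDCGo_eq_lin (fuel : Nat) : ∀ (ts : List String), ts.length ≤ fuel →
    pvColaDCGo fuel ts = pvColaLin ts := by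
  induction fuel with
  | zero =>
    intro ts h
    rw [List.length_eq_zero_iff.mp (Nat.le_zero.mp h)]; rfl
  | succ fuel ih =>
    intro ts h
    match ts with
    | [] => rfl
    | t :: ts =>
      rw [pvColaDCGo]
      by_cases h1 : (t :: ts).length = 1
      · simp only [h1, if_true]
        have : ts = [] := by simpa using h1
        subst this; simp [pvColaLin]
      · simp only [h1, if_false]
        have hl : ts.length ≠ 0 := fun h0 => h1 (by simp [h0])
        have hf : ts.length ≤ fuel := by simpa using h
        rw [ih _ (by simp; omega), ih _ (by simp; omega),
            ← pvColaLin_append, List.take_append_drop]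

lemma pvColaDC_eq_lin (ts : List String) : pvColaDC ts = pvColaLin ts :=
  pvColaDCGo_eq_lin ts.length ts (le_refl _)

-- A's loop over the tail (index ≥ 1): the i == 0 branch never fires, so it appends the fragments
lemma pv_foldA_tail (rest : List String) : ∀ (k : Int) (acc : String), 1 ≤ k →
    (PySem.List.enumerate rest k).foldl pvStepA acc = acc ++ pvColaLin rest := by
  induction rest with
  | nil => intro k acc _; simp [PySem.List.enumerate_nil, pvColaLin]
  | cons t rest ih =>
    intro k acc hk
    rw [PySem.List.enumerate_cons, List.foldl_cons, ih (k + 1) _ (by omega), pvColaLin]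
    have hk0 : (k == 0) = false := by simp; omega
    unfold pvStepA pvSigno
    simp only [hk0, Bool.false_eq_true, if_false]
    split_ifs <;> simp [String.append_assoc]

-- ===== VERDICT =====
theorem mostrar_como_expresion_spec : Claim_equal_mostrar_como_expresion := by
  unfold Claim_equal_mostrar_como_expresion
  intro lista _
  unfold Spec_mostrar_como_expresion mostrar_como_expresion mostrar_como_expresion_alt
  cases lista with
  | nil => decide
  | cons t rest =>
    rw [PySem.List.enumerate_cons, List.foldl_cons,
        pv_foldA_tail rest (0 + 1) _ (by norm_num)]
    simp only [pvColaDC_eq_lin]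
    unfold pvStepA
    by_cases h : PySem.Str.startswith t "-"
    · simp only [h, if_true, String.empty_append]
    · simp only [h, Bool.false_eq_true, if_false]
      norm_num
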